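-- pv_equiv track=rewrite | github.com/awsunit/GooglePrep | py_a/stockprun.py | stock_runs
-- ===== SOURCE A (Python) =====
-- def stock_runs(prices):
--
--     if len(prices) < 2:
--         return 0
--
--     longest = 0
--     spot = 0
--
--     while spot < len(prices):
--         temp = 1
--         prev = prices[spot]
--         nxt = spot + 1
--         # check for continual growth
--         while nxt < len(prices) and prices[nxt] > prev:
--             prev = prices[nxt]
--             nxt += 1
--             temp += 1
--         if temp > longest:
--             longest = temp
--
--         temp = 1
--         prev = prices[spot]
--         nxt = spot + 1
--         while nxt < len(prices) and prices[nxt] < prev: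
--             prev = prices[nxt]
--             nxt += 1
--             temp += 1
--         if temp > longest:
--             longest = temp
--
--         spot += 1
--
--     return longest
-- ===== SOURCE B (Python) =====
-- def stock_runs(prices):
--     if len(prices) < 2:
--         return 0
--     best = up = down = 1
--     # backward dynamic programming: up/down = length of the strictly
--     # increasing/decreasing run STARTING at the current position
--     for prev, cur in reversed(list(zip(prices, prices[1:]))):
--         up = up + 1 if cur > prev else 1
--         down = down + 1 if cur < prev else 1
--         best = max(best, up, down)
--     return best
-- ===== Notes on version B (the rewrite author's own statement) =====
-- stated objective: faster
-- what changed: Replaced A's nested scans (for each start index, walk the whole increasing and decreasing run forward) with a single backward pass that maintains the increasing/decreasing run lengths starting at the current position as a DP and maxes them on the fly.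
import Mathlib
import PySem

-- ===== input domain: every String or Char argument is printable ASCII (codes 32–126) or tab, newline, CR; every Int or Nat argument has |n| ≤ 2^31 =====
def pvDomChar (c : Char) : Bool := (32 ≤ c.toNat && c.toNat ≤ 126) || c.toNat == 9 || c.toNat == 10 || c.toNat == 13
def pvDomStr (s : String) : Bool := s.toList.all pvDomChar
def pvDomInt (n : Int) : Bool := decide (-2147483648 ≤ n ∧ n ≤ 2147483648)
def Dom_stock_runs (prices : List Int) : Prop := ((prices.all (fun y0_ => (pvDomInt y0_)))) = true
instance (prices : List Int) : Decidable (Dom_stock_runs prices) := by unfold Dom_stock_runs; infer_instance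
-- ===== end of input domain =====

-- B replaces A's quadratic nested forward scans by one backward pass maintaining the
-- run lengths starting at the current index (objective: faster, O(n^2) -> O(n)).

-- ===== PORT A =====
-- inner 'while nxt < len(prices) and prices[nxt] > prev' loop; prices[nxt] is always
-- in range here, so List.getD is exact
def stockInnerUp (prices : List Int) (prev : Int) (nxt : Nat) (temp : Int) : Int :=
  if h : nxt < prices.length then
    if prices.getD nxt 0 > prev then
      stockInnerUp prices (prices.getD nxt 0) (nxt + 1) (temp + 1)
    else temp
  else temp
termination_by prices.length - nxt
decreasing_by omega

-- inner 'while nxt < len(prices) and prices[nxt] < prev' loop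
def stockInnerDown (prices : List Int) (prev : Int) (nxt : Nat) (temp : Int) : Int :=
  if h : nxt < prices.length then
    if prices.getD nxt 0 < prev then
      stockInnerDown prices (prices.getD nxt 0) (nxt + 1) (temp + 1)
    else temp
  else temp
termination_by prices.length - nxt
decreasing_by omega

-- outer 'while spot < len(prices)' loop
def stockOuter (prices : List Int) (spot : Nat) (longest : Int) : Int :=
  if h : spot < prices.length then
    let t1 := stockInnerUp prices (prices.getD spot 0) (spot + 1) 1
    let l1 := if t1 > longest then t1 else longest
    let t2 := stockInnerDown prices (prices.getD spot 0) (spot + 1) 1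
    let l2 := if t2 > l1 then t2 else l1
    stockOuter prices (spot + 1) l2
  else longest
termination_by prices.length - spot
decreasing_by omega

def stock_runs (prices : List Int) : Int :=
  if prices.length < 2 then 0
  else stockOuter prices 0 0

-- ===== PORT B =====
-- 'for prev, cur in reversed(list(zip(prices, prices[1:])))' threading (best, up, down):
-- a right fold over the adjacent pairs visits them in exactly that reversed order
def stockStep (p : Int × Int) (s : Int × Int × Int) : Int × Int × Int :=
  let up := if p.2 > p.1 then s.2.1 + 1 else 1
  let down := if p.2 < p.1 then s.2.2 + 1 else 1
  (max (max s.1 up) down, up, down)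

def stock_runs_alt (prices : List Int) : Int :=
  if prices.length < 2 then 0
  else ((prices.zip (prices.drop 1)).foldr stockStep (1, 1, 1)).1

-- ===== PRECONDITION & SPEC =====
def Spec_stock_runs (prices : List Int) (out : Int) : Prop := out = stock_runs_alt prices
instance (prices : List Int) (out : Int) : Decidable (Spec_stock_runs prices out) := by unfold Spec_stock_runs; infer_instance

-- ===== CLAIM (what is proved, stated in full; the proofs are below) =====
def Claim_equal_stock_runs : Prop := ∀ (prices : List Int), Dom_stock_runs prices → Spec_stock_runs prices (stock_runs prices)

-- ===== LEMMAS AND PROOFS =====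

-- length of the strictly increasing chain continuing prev at the head of the list
def chainUp (prev : Int) : List Int → Int
  | [] => 0
  | b :: t => if b > prev then chainUp b t + 1 else 0

def chainDown (prev : Int) : List Int → Int
  | [] => 0
  | b :: t => if b < prev then chainDown b t + 1 else 0

-- structural reading of A's outer loop on the suffix prices.drop spot
def maxRuns : List Int → Int → Int
  | [], longest => longest
  | a :: t, longest =>
      let t1 := 1 + chainUp a t
      let l1 := if t1 > longest then t1 else longest
      let t2 := 1 + chainDown a t
      let l2 := if t2 > l1 then t2 else l1
      maxRuns t l2

lemma stockInnerUp_eq (prices : List Int) :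
    ∀ fuel nxt prev temp, prices.length - nxt ≤ fuel →
      stockInnerUp prices prev nxt temp = temp + chainUp prev (prices.drop nxt) := by
  intro fuel
  induction fuel with
  | zero =>
      intro nxt prev temp hle
      have h : ¬ nxt < prices.length := by omega
      rw [stockInnerUp, dif_neg h, List.drop_eq_nil_of_le (by omega)]
      simp [chainUp]
  | succ k ih =>
      intro nxt prev temp hle
      rw [stockInnerUp]
      by_cases h : nxt < prices.length
      · rw [dif_pos h, List.drop_eq_getElem_cons h, List.getD_eq_getElem prices 0 h]
        by_cases hc : prices[nxt] > prev
        · rw [if_pos hc, ih (nxt + 1) _ _ (by omega)]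
          simp only [chainUp, if_pos hc]
          ring
        · rw [if_neg hc]
          simp only [chainUp, if_neg hc]
          ring
      · rw [dif_neg h, List.drop_eq_nil_of_le (by omega)]
        simp [chainUp]

lemma stockInnerDown_eq (prices : List Int) :
    ∀ fuel nxt prev temp, prices.length - nxt ≤ fuel →
      stockInnerDown prices prev nxt temp = temp + chainDown prev (prices.drop nxt) := by
  intro fuel
  induction fuel with
  | zero =>
      intro nxt prev temp hle
      have h : ¬ nxt < prices.length := by omega
      rw [stockInnerDown, dif_neg h, List.drop_eq_nil_of_le (by omega)]
      simp [chainDown]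
  | succ k ih =>
      intro nxt prev temp hle
      rw [stockInnerDown]
      by_cases h : nxt < prices.length
      · rw [dif_pos h, List.drop_eq_getElem_cons h, List.getD_eq_getElem prices 0 h]
        by_cases hc : prices[nxt] < prev
        · rw [if_pos hc, ih (nxt + 1) _ _ (by omega)]
          simp only [chainDown, if_pos hc]
          ring
        · rw [if_neg hc]
          simp only [chainDown, if_neg hc]
          ring
      · rw [dif_neg h, List.drop_eq_nil_of_le (by omega)]
        simp [chainDown]

lemma stockOuter_eq (prices : List Int) :
    ∀ fuel spot longest, prices.length - spot ≤ fuel →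
      stockOuter prices spot longest = maxRuns (prices.drop spot) longest := by
  intro fuel
  induction fuel with
  | zero =>
      intro spot longest hle
      have h : ¬ spot < prices.length := by omega
      rw [stockOuter, dif_neg h, List.drop_eq_nil_of_le (by omega)]
      rfl
  | succ k ih =>
      intro spot longest hle
      rw [stockOuter]
      by_cases h : spot < prices.length
      · rw [dif_pos h, List.drop_eq_getElem_cons h, List.getD_eq_getElem prices 0 h]
        simp only [maxRuns]
        rw [ih (spot + 1) _ (by omega),
            stockInnerUp_eq prices (prices.length - (spot + 1)) _ _ _ (le_refl _),
            stockInnerDown_eq prices (prices.length - (spot + 1)) _ _ _ (le_refl _)]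
      · rw [dif_neg h, List.drop_eq_nil_of_le (by omega)]
        rfl

-- the maximum B computes, read structurally
def bBest : List Int → Int
  | [] => 1
  | [_] => 1
  | a :: b :: t => max (max (bBest (b :: t)) (1 + chainUp a (b :: t))) (1 + chainDown a (b :: t))

lemma foldr_stockStep (a : Int) (t : List Int) :
    ((a :: t).zip t).foldr stockStep (1, 1, 1)
      = (bBest (a :: t), 1 + chainUp a t, 1 + chainDown a t) := by
  induction t generalizing a with
  | nil => simp [bBest, chainUp, chainDown]
  | cons b t ih =>
      have : ((a :: b :: t).zip (b :: t)) = (a, b) :: ((b :: t).zip t) := rfl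
      rw [this, List.foldr_cons, ih b]
      simp only [stockStep, bBest, chainUp, chainDown]
      by_cases h1 : b > a <;> by_cases h2 : b < a <;>
        simp [h1, h2] <;> first | exact ⟨trivial, trivial⟩ | omega

lemma bBest_pos : ∀ l : List Int, 1 ≤ bBest l
  | [] => le_refl 1
  | [_] => le_refl 1
  | _ :: b :: t => by
      have := bBest_pos (b :: t)
      simp only [bBest]
      omega

lemma maxRuns_eq_bBest (l : List Int) :
    ∀ (a : Int) (longest : Int), maxRuns (a :: l) longest = max longest (bBest (a :: l)) := by
  induction l with
  | nil =>
      intro a longest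
      simp only [maxRuns, bBest, chainUp, chainDown]
      split_ifs <;> omega
  | cons b t ih =>
      intro a longest
      rw [maxRuns, ih b]
      simp only [bBest]
      split_ifs <;> omega

-- ===== VERDICT (by name: the statement is the Claim_ definition above) =====
theorem stock_runs_spec : Claim_equal_stock_runs := by
  intro prices _
  unfold Spec_stock_runs stock_runs stock_runs_alt
  by_cases h : prices.length < 2
  · rw [if_pos h, if_pos h]
  · rw [if_neg h, if_neg h]
    match prices, h with
    | a :: t, h =>
      rw [stockOuter_eq (a :: t) (a :: t).length 0 0 (by omega)]
      simp only [List.drop_zero, List.drop_one, List.tail_cons]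
      rw [foldr_stockStep, maxRuns_eq_bBest]
      have := bBest_pos (a :: t)
      simp
      omega
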